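-- pv_equiv track=rewrite | github.com/manwar/perlweeklychallenge-club | challenge-336/roger-bell-west/python/ch-1.py | equalgroup
-- ===== SOURCE A (Python) =====
-- from collections import defaultdict
--
-- def equalgroup(a):
--   s = defaultdict(lambda: 0)
--   for n in a:
--     s[n] += 1
--   v = sorted(list(set(s.values())))
--   l = v[0]
--   if l < 2:
--     return False
--   for t in range(2, l + 1):
--     if all(c % t == 0 for c in v):
--       return True
--   return False
-- ===== SOURCE B (Python) =====
-- from collections import Counter
--
-- def equalgroup(a):
--   g = 0
--   for c in Counter(a).values():
--     while c > 0:
--       g, c = c, g % c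
--   return g >= 2
-- ===== Notes on version B (the rewrite author's own statement) =====
-- stated objective: alternative
-- what changed: Replace the trial search over every candidate divisor t in [2, min count] (each checked against all distinct counts) by a single Euclidean-gcd fold over the counts: the answer is gcd(counts) >= 2.
-- outside the precondition, e.g. on equalgroup([]): A raises IndexError, B returns False
import Mathlib
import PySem

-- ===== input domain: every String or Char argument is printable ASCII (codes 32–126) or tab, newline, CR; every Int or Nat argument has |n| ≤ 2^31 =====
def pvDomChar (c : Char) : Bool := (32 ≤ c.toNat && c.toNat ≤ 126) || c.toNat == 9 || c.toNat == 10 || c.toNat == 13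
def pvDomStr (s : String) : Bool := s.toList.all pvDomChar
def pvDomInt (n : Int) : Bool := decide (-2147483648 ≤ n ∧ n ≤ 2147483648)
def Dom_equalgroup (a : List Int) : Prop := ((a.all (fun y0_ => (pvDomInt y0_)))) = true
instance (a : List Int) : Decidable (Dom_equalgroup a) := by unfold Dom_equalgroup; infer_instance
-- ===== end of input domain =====

-- B replaces A's trial search over candidate divisors by a single Euclidean-gcd fold over the counts.
-- A raises IndexError on the empty list; that input is excluded by Pre_.

-- ===== PORT A =====
def equalgroup (a : List Int) : Bool :=
  let s := a.foldl (fun d n => d.insert n (d.getD n 0 + 1)) PySem.Dict.empty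
  let v := PySem.List.sorted (PySem.Set.ofList s.values) (fun x => x) false
  match v with
  | [] => false  -- Python raises IndexError here (only a = []); excluded by Pre_equalgroup
  | l :: _ =>
    if l < 2 then false
    else (PySem.List.pyRange 2 (l + 1) 1).any (fun t => v.all (fun c => PySem.Int.mod c t == 0))

-- ===== PORT B =====
-- 'while c > 0: g, c = c, g % c' from Source B
def pyGcdLoop (g c : Int) : Int :=
  if h : 0 < c then pyGcdLoop c (PySem.Int.mod g c) else g
termination_by c.toNat
decreasing_by
  have h1 := PySem.Int.mod_nonneg g h
  have h2 := PySem.Int.mod_lt g h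
  omega

def equalgroup_alt (a : List Int) : Bool :=
  let g := (PySem.Dict.counter a).values.foldl pyGcdLoop 0
  decide (2 ≤ g)

-- ===== PRECONDITION & SPEC =====
-- Pre_ excludes only the empty list, on which A raises IndexError.
def Pre_equalgroup (a : List Int) : Prop := a ≠ []
instance (a : List Int) : Decidable (Pre_equalgroup a) := by unfold Pre_equalgroup; infer_instance
def pvWitness_equalgroup : List Int := [1, 1, 2, 2]

def Spec_equalgroup (a : List Int) (out : Bool) : Prop := out = equalgroup_alt a
instance (a : List Int) (out : Bool) : Decidable (Spec_equalgroup a out) := by unfold Spec_equalgroup; infer_instance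

-- ===== CLAIM (what is proved, stated in full; the proofs are below) =====
def Claim_equal_equalgroup : Prop := ∀ (a : List Int), Dom_equalgroup a → Pre_equalgroup a → Spec_equalgroup a (equalgroup a)

-- ===== LEMMAS AND PROOFS =====

-- The Euclid loop computes Int.gcd on nonnegative inputs.
theorem gcd_emod_step (g c : Int) (hg : 0 ≤ g) (hc : 0 < c) :
    Int.gcd c (g % c) = Int.gcd g c := by
  obtain ⟨m, rfl⟩ := Int.eq_ofNat_of_zero_le hg
  obtain ⟨n, rfl⟩ := Int.eq_ofNat_of_zero_le hc.le
  rw [← Int.natCast_mod, Int.gcd_natCast_natCast, Int.gcd_natCast_natCast,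
      Nat.gcd_comm n (m % n), ← Nat.gcd_rec, Nat.gcd_comm]

theorem pyGcdLoop_eq_gcd (g c : Int) (hg : 0 ≤ g) (hc : 0 ≤ c) :
    pyGcdLoop g c = (Int.gcd g c : Int) := by
  induction g, c using pyGcdLoop.induct with
  | case1 g c h ih =>
    rw [pyGcdLoop, dif_pos h, ih h.le (PySem.Int.mod_nonneg g h),
        PySem.Int.mod_eq_emod_of_pos h]
    exact congrArg (Nat.cast) (gcd_emod_step g c hg h)
  | case2 g c h =>
    rw [pyGcdLoop, dif_neg h]
    have : c = 0 := by omega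
    subst this
    simp [Int.gcd, Int.natAbs_of_nonneg hg]

-- foldl pyGcdLoop = foldl of Int.gcd on nonnegative lists.
theorem foldl_pyGcdLoop_eq (L : List Int) (g : Int) (hg : 0 ≤ g) (hL : ∀ c ∈ L, 0 ≤ c) :
    L.foldl pyGcdLoop g = L.foldl (fun x c => (Int.gcd x c : Int)) g := by
  induction L generalizing g with
  | nil => rfl
  | cons c t ih =>
    simp only [List.foldl_cons]
    rw [pyGcdLoop_eq_gcd g c hg (hL c (by simp))]
    exact ih _ (Int.natCast_nonneg _) (fun x hx => hL x (by simp [hx]))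

theorem foldl_gcd_dvd (L : List Int) (g : Int) :
    (L.foldl (fun x c => (Int.gcd x c : Int)) g) ∣ g ∧
    ∀ c ∈ L, (L.foldl (fun x c => (Int.gcd x c : Int)) g) ∣ c := by
  induction L generalizing g with
  | nil => exact ⟨dvd_refl g, by simp⟩
  | cons c t ih =>
    obtain ⟨h1, h2⟩ := ih ((Int.gcd g c : Int))
    refine ⟨h1.trans (Int.gcd_dvd_left g c), ?_⟩
    intro x hx
    rcases List.mem_cons.mp hx with rfl | hx
    · exact h1.trans (Int.gcd_dvd_right g _)
    · exact h2 x hx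

theorem dvd_foldl_gcd (L : List Int) (g t : Int) (htg : t ∣ g) (hL : ∀ c ∈ L, t ∣ c) :
    t ∣ L.foldl (fun x c => (Int.gcd x c : Int)) g := by
  induction L generalizing g with
  | nil => exact htg
  | cons c s ih =>
    simp only [List.foldl_cons]
    exact ih _ (Int.dvd_coe_gcd htg (hL c (by simp))) (fun x hx => hL x (by simp [hx]))

theorem foldl_gcd_nonneg (L : List Int) (g : Int) (hg : 0 ≤ g) :
    0 ≤ L.foldl (fun x c => (Int.gcd x c : Int)) g := by
  induction L generalizing g with
  | nil => exact hg
  | cons c t ih => exact ih _ (Int.natCast_nonneg _)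

-- ===== VERDICT (by name: the statement is the Claim_ definition above) =====
theorem equalgroup_spec : Claim_equal_equalgroup := by
  unfold Claim_equal_equalgroup
  intro a _ hpre
  simp only [Spec_equalgroup, equalgroup, equalgroup_alt]
  rw [PySem.Dict.foldl_insert_getD_add_one_eq_counter]
  set L := (PySem.Dict.counter a).values with hLdef
  have hLmap : L = (PySem.Dict.counter a).keys.map (fun k => (PySem.Dict.counter a).getD k 0) :=
    PySem.Dict.values_eq_map_keys _ (PySem.Dict.nodup_keys_counter a) 0
  have hpos : ∀ c ∈ L, 1 ≤ c := by
    intro c hc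
    rw [hLmap] at hc
    obtain ⟨k, hk, rfl⟩ := List.mem_map.mp hc
    rw [PySem.Dict.keys_counter] at hk
    have hka : k ∈ a := (PySem.Set.mem_ofList _ _).mp hk
    rw [PySem.Dict.getD_counter]
    have h1 : 0 < a.count k := List.count_pos_iff.mpr hka
    exact_mod_cast h1
  have hLne : L ≠ [] := by
    cases a with
    | nil => exact absurd rfl hpre
    | cons x xs =>
      rw [hLmap]
      intro h
      have : (PySem.Dict.counter (x :: xs)).keys = [] := List.map_eq_nil_iff.mp h
      rw [PySem.Dict.keys_counter] at this
      have hx : x ∈ PySem.Set.ofList (x :: xs) := (PySem.Set.mem_ofList _ _).mpr (by simp)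
      rw [this] at hx
      exact absurd hx (List.not_mem_nil)
  -- switch the B side to the gcd fold
  rw [foldl_pyGcdLoop_eq L 0 le_rfl (fun c hc => le_trans (by omega) (hpos c hc))]
  set F := L.foldl (fun x c => (Int.gcd x c : Int)) 0 with hFdef
  have hFdvd : ∀ c ∈ L, F ∣ c := (foldl_gcd_dvd L 0).2
  have hFge : 0 ≤ F := foldl_gcd_nonneg L 0 le_rfl
  -- analyze the sorted distinct value list
  cases hv : PySem.List.sorted (PySem.Set.ofList L) (fun x => x) false with
  | nil =>
    exfalso
    rw [PySem.List.sorted_eq_nil_iff] at hv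
    obtain ⟨c, hc⟩ := List.exists_mem_of_ne_nil L hLne
    have : c ∈ PySem.Set.ofList L := (PySem.Set.mem_ofList _ _).mpr hc
    rw [hv] at this
    exact absurd this (List.not_mem_nil)
  | cons l tv =>
    simp only []
    have hmemv : ∀ x, x ∈ l :: tv ↔ x ∈ L := by
      intro x
      rw [← hv, PySem.List.mem_sorted]
      exact PySem.Set.mem_ofList _ _
    have hlL : l ∈ L := (hmemv l).mp (by simp)
    have hlmin : ∀ y ∈ L, l ≤ y := by
      intro y hy
      exact PySem.List.key_head_sorted_le _ _ hv y ((PySem.Set.mem_ofList _ _).mpr hy)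
    have hl1 : 1 ≤ l := hpos l hlL
    by_cases hl2 : l < 2
    · rw [if_pos hl2]
      have hFl : F ∣ l := hFdvd l hlL
      have : l = 1 := by omega
      subst this
      have hF1 : F ≤ 1 := Int.le_of_dvd (by omega) hFl
      symm
      simp only [decide_eq_false_iff_not]
      omega
    · rw [if_neg hl2]
      symm
      rcases hF2 : decide (2 ≤ F) with _ | _
      · -- F < 2 : no divisor t works
        simp only [decide_eq_false_iff_not, not_le] at hF2
        symm
        rw [List.any_eq_false]
        intro t ht
        rw [PySem.List.mem_pyRange_one] at ht
        intro hall
        rw [List.all_eq_true] at hall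
        have hdvd : ∀ c ∈ L, t ∣ c := by
          intro c hc
          have h := hall c ((hmemv c).mpr hc)
          rw [beq_iff_eq] at h
          exact (PySem.Int.mod_eq_zero_iff_dvd c t).mp h
        have htF : t ∣ F := dvd_foldl_gcd L 0 t (dvd_zero t) hdvd
        have hFne : F ≠ 0 := by
          intro h0
          have := hFdvd l hlL
          rw [h0] at this
          have := zero_dvd_iff.mp this
          omega
        have : t ≤ F := Int.le_of_dvd (by omega) htF
        omega
      · -- 2 ≤ F : t = F works
        simp only [decide_eq_true_eq] at hF2
        symm
        rw [List.any_eq_true]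
        refine ⟨F, ?_, ?_⟩
        · rw [PySem.List.mem_pyRange_one]
          have hFl : F ≤ l := Int.le_of_dvd (by omega) (hFdvd l hlL)
          omega
        · rw [List.all_eq_true]
          intro c hc
          have hcL : c ∈ L := (hmemv c).mp hc
          have : PySem.Int.mod c F = 0 := (PySem.Int.mod_eq_zero_iff_dvd c F).mpr (hFdvd c hcL)
          simp [this]
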